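-- pv_equiv track=rewrite | github.com/mskfox/grundy | grundy/nodes/atoms/utils.py | electrons_per_orbit
-- ===== SOURCE A (Python) =====
-- from typing import List, Tuple, Optional
--
-- def electrons_per_orbit(total_electrons: int) -> Tuple[int, List[int]]:
--     """
--     Calculate electron distribution across orbits based on quantum mechanics.
--
--     Args:
--         total_electrons: Total number of electrons to distribute
--
--     Returns:
--         Amount of layers.
--         List of electron counts for each orbit
--     """
--     orbits = []
--     principal_quantum_number = 1
--
--     while total_electrons > 0:
--         max_electrons = 2 * principal_quantum_number ** 2
--         current_electrons = min(total_electrons, max_electrons)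
--         orbits.append(current_electrons)
--
--         total_electrons -= current_electrons
--         principal_quantum_number += 1
--
--     total_layers = len(orbits)
--     return total_layers, orbits
-- ===== SOURCE B (Python) =====
-- def electrons_per_orbit(total_electrons):
--     """Closed-form: binary-search the number n of full shells with
--     cum(n) = n(n+1)(2n+1)/3 <= total, then build the orbit list directly."""
--     t = total_electrons
--     if t <= 0:
--         return 0, []
--     # largest n with n*(n+1)*(2*n+1) <= 3*t; n <= t is a safe upper bound
--     lo, hi = 0, t
--     while lo < hi:
--         mid = (lo + hi + 1) // 2
--         if mid * (mid + 1) * (2 * mid + 1) <= 3 * t: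
--             lo = mid
--         else:
--             hi = mid - 1
--     n = lo
--     orbits = [2 * k * k for k in range(1, n + 1)]
--     r = t - n * (n + 1) * (2 * n + 1) // 3
--     if r > 0:
--         orbits.append(r)
--     return len(orbits), orbits
-- ===== Notes on version B (the rewrite author's own statement) =====
-- stated objective: alternative
-- what changed: Replaces A's shell-by-shell subtraction loop with a binary search for the number of full shells using the closed-form cumulative capacity formula n*(n+1)*(2n+1) over three, then builds the orbit list and remainder directly.
import Mathlib
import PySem

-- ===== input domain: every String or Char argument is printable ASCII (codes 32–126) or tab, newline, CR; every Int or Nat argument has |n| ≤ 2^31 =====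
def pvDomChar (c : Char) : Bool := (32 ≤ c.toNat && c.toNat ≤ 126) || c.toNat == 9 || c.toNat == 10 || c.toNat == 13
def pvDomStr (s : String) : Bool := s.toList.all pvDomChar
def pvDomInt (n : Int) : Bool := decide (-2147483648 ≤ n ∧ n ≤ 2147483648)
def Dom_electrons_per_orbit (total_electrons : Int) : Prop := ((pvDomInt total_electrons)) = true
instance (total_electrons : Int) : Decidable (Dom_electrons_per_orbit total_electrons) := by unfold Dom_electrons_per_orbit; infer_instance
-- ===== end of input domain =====

-- B replaces A's shell-by-shell subtraction loop with a binary search for the number of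
-- full shells (via the cumulative capacity n(n+1)(2n+1)/3) plus a direct list build (alternative).

-- ===== PORT A =====
-- A's while loop; fuel = total_electrons.toNat (each iteration subtracts at least 1).
def pvLoopA : Nat → Int → Int → List Int
  | 0, _, _ => []
  | fuel + 1, total, q =>
    if total > 0 then
      let max_electrons := 2 * q ^ 2
      let current_electrons := min total max_electrons
      current_electrons :: pvLoopA fuel (total - current_electrons) (q + 1)
    else []

def electrons_per_orbit (total_electrons : Int) : Int × List Int :=
  let orbits := pvLoopA total_electrons.toNat total_electrons 1
  ((orbits.length : Int), orbits)

-- ===== PORT B =====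
-- B's while loop (binary search for the largest n with n(n+1)(2n+1) <= 3t);
-- fuel = t.toNat bounds the iterations since the gap hi-lo (initially t) shrinks each step.
def pvBsearch : Nat → Int → Int → Int → Int
  | 0, lo, _, _ => lo
  | fuel + 1, lo, hi, t =>
    if lo < hi then
      let mid := PySem.Int.floordiv (lo + hi + 1) 2
      if mid * (mid + 1) * (2 * mid + 1) ≤ 3 * t then pvBsearch fuel mid hi t
      else pvBsearch fuel lo (mid - 1) t
    else lo

def electrons_per_orbit_alt (total_electrons : Int) : Int × List Int :=
  let t := total_electrons
  if t ≤ 0 then (0, [])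
  else
    let n := pvBsearch t.toNat 0 t t
    let orbits := (PySem.List.pyRange 1 (n + 1) 1).map (fun k => 2 * k * k)
    let r := t - PySem.Int.floordiv (n * (n + 1) * (2 * n + 1)) 3
    let orbits := if r > 0 then orbits ++ [r] else orbits
    ((orbits.length : Int), orbits)

-- ===== PRECONDITION & SPEC =====
def Spec_electrons_per_orbit (total_electrons : Int) (out : Int × List Int) : Prop := out = electrons_per_orbit_alt total_electrons
instance (total_electrons : Int) (out : Int × List Int) : Decidable (Spec_electrons_per_orbit total_electrons out) := by unfold Spec_electrons_per_orbit; infer_instance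

-- ===== CLAIM (what is proved, stated in full; the proofs are below) =====
def Claim_equal_electrons_per_orbit : Prop := ∀ (total_electrons : Int), Dom_electrons_per_orbit total_electrons → Spec_electrons_per_orbit total_electrons (electrons_per_orbit total_electrons)

-- ===== LEMMAS AND PROOFS =====

-- cumulative capacity of shells q, q+1, …, q+n-1
def pvSfrom (q : Int) : Nat → Int
  | 0 => 0
  | n + 1 => 2 * q ^ 2 + pvSfrom (q + 1) n

lemma pvSfrom_succ_back (q : Int) (n : Nat) :
    pvSfrom q (n + 1) = pvSfrom q n + 2 * (q + n) ^ 2 := by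
  induction n generalizing q with
  | zero => simp [pvSfrom]
  | succ n ih =>
    rw [show pvSfrom q (n + 1 + 1) = 2 * q ^ 2 + pvSfrom (q + 1) (n + 1) from rfl,
      ih (q + 1), show pvSfrom q (n + 1) = 2 * q ^ 2 + pvSfrom (q + 1) n from rfl]
    push_cast; ring

lemma pvSfrom_nonneg (q : Int) (n : Nat) (hq : 0 ≤ q) : 0 ≤ pvSfrom q n := by
  induction n generalizing q with
  | zero => simp [pvSfrom]
  | succ n ih => have := ih (q + 1) (by omega); simp [pvSfrom]; positivity

lemma pvSfrom_pos (q : Int) (n : Nat) (hq : 1 ≤ q) (hn : 1 ≤ n) : 0 < pvSfrom q n := by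
  cases n with
  | zero => omega
  | succ n =>
    have h1 := pvSfrom_nonneg (q + 1) n (by omega)
    have : 0 < 2 * q ^ 2 := by positivity
    simp [pvSfrom]; nlinarith

lemma pvCube (n : Nat) : (n : Int) * (n + 1) * (2 * n + 1) = 3 * pvSfrom 1 n := by
  induction n with
  | zero => simp [pvSfrom]
  | succ n ih =>
    rw [pvSfrom_succ_back]
    push_cast
    linear_combination ih

lemma pvLoopA_nonpos (fuel : Nat) (t q : Int) (ht : ¬ t > 0) : pvLoopA fuel t q = [] := by
  cases fuel with
  | zero => rfl
  | succ f => simp [pvLoopA, ht]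

-- the loop, from quantum number q, produces the closed-form list
lemma pvLoopA_eq (n : Nat) : ∀ (q t : Int) (fuel : Nat),
    1 ≤ q → 0 < t → pvSfrom q n ≤ t → t < pvSfrom q (n + 1) → t.toNat ≤ fuel →
    pvLoopA fuel t q =
      (List.range n).map (fun i : Nat => 2 * (q + (i : Int)) ^ 2) ++
        (if t - pvSfrom q n > 0 then [t - pvSfrom q n] else []) := by
  induction n with
  | zero =>
    intro q t fuel hq ht _ hub hfuel
    have h2 : t < 2 * q ^ 2 := by simpa [pvSfrom] using hub
    obtain ⟨f, rfl⟩ : ∃ f, fuel = f + 1 := ⟨fuel - 1, by omega⟩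
    have hmin : min t (2 * q ^ 2) = t := by omega
    have hz : pvLoopA f 0 (q + 1) = [] := pvLoopA_nonpos _ _ _ (by omega)
    simp [pvLoopA, ht, hmin, hz, pvSfrom]
  | succ n ih =>
    intro q t fuel hq ht hlb hub hfuel
    have hnn : 0 ≤ pvSfrom (q + 1) n := pvSfrom_nonneg _ _ (by omega)
    have hlb' : 2 * q ^ 2 + pvSfrom (q + 1) n ≤ t := by simpa [pvSfrom] using hlb
    have hq2 : (2 : Int) ≤ 2 * q ^ 2 := by nlinarith
    obtain ⟨f, rfl⟩ : ∃ f, fuel = f + 1 := ⟨fuel - 1, by omega⟩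
    have hmin : min t (2 * q ^ 2) = 2 * q ^ 2 := by omega
    have hstep : pvLoopA (f + 1) t q = 2 * q ^ 2 :: pvLoopA f (t - 2 * q ^ 2) (q + 1) := by
      simp [pvLoopA, ht, hmin]
    have hshift :
        (List.range (n + 1)).map (fun i : Nat => 2 * (q + (i : Int)) ^ 2) =
          2 * q ^ 2 :: (List.range n).map (fun i : Nat => 2 * ((q + 1) + (i : Int)) ^ 2) := by
      rw [List.range_succ_eq_map, List.map_cons, List.map_map]
      refine congrArg₂ _ (by norm_num) (List.map_congr_left ?_)
      intro i _; simp [Function.comp]; ring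
    have hrem : t - pvSfrom q (n + 1) = (t - 2 * q ^ 2) - pvSfrom (q + 1) n := by
      simp [pvSfrom]; ring
    by_cases h0 : 0 < t - 2 * q ^ 2
    · have hub' : t - 2 * q ^ 2 < pvSfrom (q + 1) (n + 1) := by
        have : t < 2 * q ^ 2 + pvSfrom (q + 1) (n + 1) := by
          simpa [pvSfrom] using hub
        omega
      have hih := ih (q + 1) (t - 2 * q ^ 2) f (by omega) h0 (by omega) hub' (by omega)
      rw [hstep, hih, hshift, hrem]; rfl
    · -- the subtraction reaches 0: then n = 0 and no remainder
      have hn0 : n = 0 := by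
        by_contra hne
        have := pvSfrom_pos (q + 1) n (by omega) (by omega)
        omega
      subst hn0
      rw [hstep, pvLoopA_nonpos _ _ _ (by omega)]
      have hps : pvSfrom q 1 = 2 * q ^ 2 := by simp [pvSfrom]
      have hcond : ¬ (t - pvSfrom q 1 > 0) := by rw [hps]; exact h0
      simp [List.range_succ, hps]
      linarith [not_lt.mp h0]

-- binary-search invariant: returns some x in [lo,hi] with P x ∧ ¬P (x+1),
-- where P x := x(x+1)(2x+1) ≤ 3t
lemma pvBsearch_spec (fuel : Nat) : ∀ (lo hi t : Int),
    lo ≤ hi → (hi - lo).toNat ≤ fuel →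
    lo * (lo + 1) * (2 * lo + 1) ≤ 3 * t →
    ¬ ((hi + 1) * (hi + 1 + 1) * (2 * (hi + 1) + 1) ≤ 3 * t) →
    lo ≤ pvBsearch fuel lo hi t ∧ pvBsearch fuel lo hi t ≤ hi ∧
      pvBsearch fuel lo hi t * (pvBsearch fuel lo hi t + 1) * (2 * pvBsearch fuel lo hi t + 1) ≤ 3 * t ∧
      ¬ ((pvBsearch fuel lo hi t + 1) * (pvBsearch fuel lo hi t + 1 + 1) * (2 * (pvBsearch fuel lo hi t + 1) + 1) ≤ 3 * t) := by
  induction fuel with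
  | zero =>
    intro lo hi t hle hgap hP hnP
    have : lo = hi := by omega
    subst this
    exact ⟨le_refl _, le_refl _, hP, hnP⟩
  | succ f ih =>
    intro lo hi t hle hgap hP hnP
    by_cases hlt : lo < hi
    · have hmid := PySem.Int.floordiv_eq_ediv_of_pos (a := lo + hi + 1) (b := 2) (by norm_num)
      have hmlo : lo + 1 ≤ PySem.Int.floordiv (lo + hi + 1) 2 := by rw [hmid]; omega
      have hmhi : PySem.Int.floordiv (lo + hi + 1) 2 ≤ hi := by rw [hmid]; omega
      rw [pvBsearch]
      simp only [hlt, if_true]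
      set mid := PySem.Int.floordiv (lo + hi + 1) 2 with hmiddef
      by_cases hc : mid * (mid + 1) * (2 * mid + 1) ≤ 3 * t
      · simp only [hc, if_true]
        have := ih mid hi t (by omega) (by omega) hc hnP
        exact ⟨by omega, this.2.1, this.2.2⟩
      · simp only [hc, if_false]
        have := ih lo (mid - 1) t (by omega) (by omega) hP (by simpa using hc)
        exact ⟨this.1, by omega, this.2.2⟩
    · have : lo = hi := by omega
      subst this
      rw [pvBsearch]
      simp only [lt_irrefl, if_false]
      exact ⟨le_refl _, le_refl _, hP, hnP⟩

-- ===== VERDICT (by name: the statement is the Claim_ definition above) =====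
theorem electrons_per_orbit_spec : Claim_equal_electrons_per_orbit := by
  intro t _
  unfold Spec_electrons_per_orbit electrons_per_orbit electrons_per_orbit_alt
  by_cases ht : t ≤ 0
  · have hz : pvLoopA t.toNat t 1 = [] := pvLoopA_nonpos _ _ _ (by omega)
    simp [ht, hz]
  · have ht : 0 < t := by omega
    simp only [not_le.mpr ht, if_false]
    -- characterise the binary-search result
    have htt : 0 < t * t * t := by positivity
    have hnP : ¬ ((t + 1) * (t + 1 + 1) * (2 * (t + 1) + 1) ≤ 3 * t) := by nlinarith [htt, sq_nonneg t]
    obtain ⟨h0n, hnt, hPn, hPn1⟩ :=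
      pvBsearch_spec t.toNat 0 t t (by omega) (by omega) (by nlinarith) hnP
    set n := pvBsearch t.toNat 0 t t with hndef
    obtain ⟨m, hm⟩ : ∃ m : Nat, n = (m : Int) := ⟨n.toNat, by omega⟩
    rw [hm] at hPn hPn1
    -- translate the cubic brackets into pvSfrom bounds
    have hcm := pvCube m
    have hcm1 := pvCube (m + 1)
    push_cast at hcm1
    have hlb : pvSfrom 1 m ≤ t := by rw [hcm] at hPn; omega
    have hub : t < pvSfrom 1 (m + 1) := by rw [hcm1] at hPn1; omega
    -- B's list equals the same closed form; A's loop equals it by pvLoopA_eq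
    have hrange : PySem.List.pyRange 1 (n + 1) 1 = (List.range m).map (fun k : Nat => 1 + (k : Int)) := by
      rw [PySem.List.pyRange_one, show (n + 1 - 1).toNat = m from by omega]
    have hmaps : (PySem.List.pyRange 1 (n + 1) 1).map (fun k => 2 * k * k) =
        (List.range m).map (fun i : Nat => 2 * (1 + (i : Int)) ^ 2) := by
      rw [hrange, List.map_map]
      refine List.map_congr_left ?_
      intro i _; simp [Function.comp]; ring
    have hfloordiv : PySem.Int.floordiv (n * (n + 1) * (2 * n + 1)) 3 = pvSfrom 1 m := by
      have hc : n * (n + 1) * (2 * n + 1) = 3 * pvSfrom 1 m := by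
        rw [hm]; exact_mod_cast pvCube m
      rw [hc, PySem.Int.floordiv_eq_ediv_of_pos (by norm_num),
        Int.mul_ediv_cancel_left _ (by norm_num)]
    rw [pvLoopA_eq m 1 t t.toNat (le_refl _) ht hlb hub (le_refl _)] at *
    simp only [hmaps, hfloordiv]
    by_cases hr : pvSfrom 1 m < t <;> simp [hr]
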